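-- pv_equiv track=rewrite | github.com/nkeisler/SmithLab | cummulativeDuration.py | split_behavior_duration
-- ===== SOURCE A (Python) =====
-- def split_behavior_duration(start_time, duration, bins):
--     split_durations = []
--
--     end_time = start_time + duration
--     for i in range(len(bins) - 1):
--         bin_start = bins[i]
--         bin_end = bins[i + 1]
--
--         # Check if behavior overlaps with the current bin
--         if start_time < bin_end and end_time > bin_start:
--             # Find the overlap between the behavior and the current bin
--             overlap_start = max(start_time, bin_start)
--             overlap_end = min(end_time, bin_end)
--             overlap_duration = overlap_end - overlap_start
--
--             # Add the duration for the current bin if there is an overlap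
--             if overlap_duration > 0:
--                 split_durations.append((i, overlap_duration))
--
--     return split_durations
-- ===== SOURCE B (Python) =====
-- def split_behavior_duration(start_time, duration, bins):
--     # Clamp-prefix (telescoping) algorithm: clamp every bin boundary into
--     # [start_time, end_time] once; the behavior's overlap with bin i is then
--     # exactly clamped[i+1] - clamped[i], with no per-bin overlap-window tests.
--     end_time = start_time + duration
--     clamped = [min(max(b, start_time), end_time) for b in bins]
--     split_durations = []
--     for i in range(len(clamped) - 1):
--         d = clamped[i + 1] - clamped[i]
--         if d > 0:
--             split_durations.append((i, d))
--     return split_durations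
-- ===== Notes on version B (the rewrite author's own statement) =====
-- stated objective: alternative
-- what changed: Instead of computing a clamped overlap window (max/min plus two overlap tests) per bin, B first clamps every bin boundary into [start_time, end_time] in one pass and then reads each bin's overlap as the telescoping difference clamped[i+1]-clamped[i], keeping the positive ones.
import Mathlib
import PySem

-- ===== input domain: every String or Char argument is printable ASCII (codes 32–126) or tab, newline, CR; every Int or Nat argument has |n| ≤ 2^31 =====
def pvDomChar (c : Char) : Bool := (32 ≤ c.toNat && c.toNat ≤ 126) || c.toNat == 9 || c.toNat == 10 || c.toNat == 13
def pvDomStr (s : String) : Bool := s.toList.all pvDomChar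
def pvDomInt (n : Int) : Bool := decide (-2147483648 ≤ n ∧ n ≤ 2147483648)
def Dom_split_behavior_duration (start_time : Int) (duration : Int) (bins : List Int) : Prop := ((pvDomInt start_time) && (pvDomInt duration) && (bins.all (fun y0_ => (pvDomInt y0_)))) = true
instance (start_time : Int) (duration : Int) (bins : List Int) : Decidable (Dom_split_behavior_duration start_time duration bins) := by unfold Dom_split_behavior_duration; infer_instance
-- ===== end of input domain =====

-- B replaces A's per-bin overlap-window computation by a clamp-prefix pass:
-- clamp each boundary into [start, end] once, then each overlap is the
-- telescoping difference of consecutive clamped boundaries — same O(n) cost.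

-- ===== PORT A =====
-- literal transliteration of A's index loop; pyGetD's default 0 is never consulted
-- (every index drawn from range(len(bins)-1) is in range), it only makes the lookup total.
def split_behavior_duration (start_time : Int) (duration : Int) (bins : List Int) : List (List Int) :=
  let end_time := start_time + duration
  (PySem.List.pyRange 0 ((bins.length : Int) - 1) 1).foldl
    (fun acc i =>
      let bin_start := PySem.List.pyGetD bins i 0
      let bin_end := PySem.List.pyGetD bins (i + 1) 0
      if start_time < bin_end ∧ end_time > bin_start then
        let overlap_start := max start_time bin_start
        let overlap_end := min end_time bin_end
        let overlap_duration := overlap_end - overlap_start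
        if overlap_duration > 0 then acc ++ [[i, overlap_duration]] else acc
      else acc) []

-- ===== PORT B =====
def split_behavior_duration_alt (start_time : Int) (duration : Int) (bins : List Int) : List (List Int) :=
  let end_time := start_time + duration
  let clamped := bins.map (fun b => min (max b start_time) end_time)
  (PySem.List.pyRange 0 ((clamped.length : Int) - 1) 1).foldl
    (fun acc i =>
      let d := PySem.List.pyGetD clamped (i + 1) 0 - PySem.List.pyGetD clamped i 0
      if d > 0 then acc ++ [[i, d]] else acc) []

-- ===== PRECONDITION & SPEC =====
def Spec_split_behavior_duration (start_time : Int) (duration : Int) (bins : List Int) (out : List (List Int)) : Prop := out = split_behavior_duration_alt start_time duration bins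
instance (start_time : Int) (duration : Int) (bins : List Int) (out : List (List Int)) : Decidable (Spec_split_behavior_duration start_time duration bins out) := by unfold Spec_split_behavior_duration; infer_instance

-- ===== CLAIM (what is proved, stated in full; the proofs are below) =====
def Claim_equal_split_behavior_duration : Prop := ∀ (start_time : Int) (duration : Int) (bins : List Int), Dom_split_behavior_duration start_time duration bins → Spec_split_behavior_duration start_time duration bins (split_behavior_duration start_time duration bins)

-- ===== LEMMAS AND PROOFS =====

-- two nested conditional appends fuse into one conjunctive test
lemma if_if_append_fuse {α β : Type} (c1 c2 : α → Prop) [DecidablePred c1] [DecidablePred c2]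
    (f : α → β) :
    (fun (acc : List β) (x : α) => if c1 x then (if c2 x then acc ++ [f x] else acc) else acc) =
      (fun acc x => if c1 x ∧ c2 x then acc ++ [f x] else acc) := by
  funext acc x
  split_ifs <;> first | rfl | tauto

-- A in filter/map form: its nested conditionals fused into one predicate
lemma portA_eq_filter_map (s d : Int) (bins : List Int) :
    split_behavior_duration s d bins =
      ((PySem.List.pyRange 0 ((bins.length : Int) - 1)).filter
        (fun i => decide ((s < PySem.List.pyGetD bins (i + 1) 0 ∧ s + d > PySem.List.pyGetD bins i 0) ∧
          min (s + d) (PySem.List.pyGetD bins (i + 1) 0) - max s (PySem.List.pyGetD bins i 0) > 0))).map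
        (fun i => [i, min (s + d) (PySem.List.pyGetD bins (i + 1) 0) - max s (PySem.List.pyGetD bins i 0)]) := by
  unfold split_behavior_duration
  dsimp only
  rw [if_if_append_fuse
    (fun i => s < PySem.List.pyGetD bins (i + 1) 0 ∧ s + d > PySem.List.pyGetD bins i 0)
    (fun i => min (s + d) (PySem.List.pyGetD bins (i + 1) 0) - max s (PySem.List.pyGetD bins i 0) > 0)
    (fun i => [i, min (s + d) (PySem.List.pyGetD bins (i + 1) 0) - max s (PySem.List.pyGetD bins i 0)])]
  rw [PySem.List.foldl_append_ite]
  simp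

-- B in filter/map form over the same index range (map preserves length)
lemma portB_eq_filter_map (s d : Int) (bins : List Int) :
    split_behavior_duration_alt s d bins =
      ((PySem.List.pyRange 0 ((bins.length : Int) - 1)).filter
        (fun i => decide (PySem.List.pyGetD (bins.map (fun b => min (max b s) (s + d))) (i + 1) 0 -
          PySem.List.pyGetD (bins.map (fun b => min (max b s) (s + d))) i 0 > 0))).map
        (fun i => [i, PySem.List.pyGetD (bins.map (fun b => min (max b s) (s + d))) (i + 1) 0 -
          PySem.List.pyGetD (bins.map (fun b => min (max b s) (s + d))) i 0]) := by
  unfold split_behavior_duration_alt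
  dsimp only
  rw [PySem.List.foldl_append_ite]
  simp

-- ===== VERDICT (by name: the statement is the Claim_ definition above) =====
theorem split_behavior_duration_spec : Claim_equal_split_behavior_duration := by
  intro s d bins _
  unfold Spec_split_behavior_duration
  rw [portA_eq_filter_map, portB_eq_filter_map]
  -- pointwise facts on every index of the shared range
  have key : ∀ j : Int, j ∈ PySem.List.pyRange 0 ((bins.length : Int) - 1) →
      PySem.List.pyGetD (bins.map (fun b => min (max b s) (s + d))) j 0 =
        min (max (PySem.List.pyGetD bins j 0) s) (s + d) ∧
      PySem.List.pyGetD (bins.map (fun b => min (max b s) (s + d))) (j + 1) 0 =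
        min (max (PySem.List.pyGetD bins (j + 1) 0) s) (s + d) := by
    intro j hj
    rw [PySem.List.mem_pyRange_one] at hj
    have hlt : j < (bins.length : Int) := by omega
    have hmlen : ((bins.map (fun b => min (max b s) (s + d))).length : Int) = (bins.length : Int) := by
      simp
    constructor
    · rw [PySem.List.pyGetD_eq_getElem _ 0 hj.1 (by omega),
        PySem.List.pyGetD_eq_getElem bins 0 hj.1 hlt]
      simp
    · rw [PySem.List.pyGetD_eq_getElem _ 0 (by omega) (by omega),
        PySem.List.pyGetD_eq_getElem bins 0 (by omega) (by omega)]
      simp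
  have hfilter :
      (PySem.List.pyRange 0 ((bins.length : Int) - 1)).filter
        (fun i => decide ((s < PySem.List.pyGetD bins (i + 1) 0 ∧ s + d > PySem.List.pyGetD bins i 0) ∧
          min (s + d) (PySem.List.pyGetD bins (i + 1) 0) - max s (PySem.List.pyGetD bins i 0) > 0)) =
      (PySem.List.pyRange 0 ((bins.length : Int) - 1)).filter
        (fun i => decide (PySem.List.pyGetD (bins.map (fun b => min (max b s) (s + d))) (i + 1) 0 -
          PySem.List.pyGetD (bins.map (fun b => min (max b s) (s + d))) i 0 > 0)) := by
    apply List.filter_congr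
    intro j hj
    obtain ⟨h1, h2⟩ := key j hj
    rw [h1, h2, decide_eq_decide]
    omega
  rw [hfilter]
  apply List.map_congr_left
  intro j hj
  obtain ⟨h1, h2⟩ := key j (List.mem_of_mem_filter hj)
  rw [h1, h2]
  have hj' := List.of_mem_filter hj
  rw [decide_eq_true_iff] at hj'
  rw [h1, h2] at hj'
  have : min (s + d) (PySem.List.pyGetD bins (j + 1) 0) - max s (PySem.List.pyGetD bins j 0) =
      min (max (PySem.List.pyGetD bins (j + 1) 0) s) (s + d) -
        min (max (PySem.List.pyGetD bins j 0) s) (s + d) := by omega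
  rw [this]
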